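-- pv_equiv track=rewrite | github.com/felixpeng24/algo | 260.py | reconstruct_from_directions
-- ===== SOURCE A (Python) =====
-- def reconstruct_from_directions(directions):
--     n = len(directions)
--     res = []
--     stack = []
--
--     for i in range(n):
--         stack.append(i)
--         # If it's the end or the next comparison is '+', flush the stack
--         if i == n - 1 or directions[i + 1] == '+':
--             while stack:
--                 res.append(stack.pop())
--
--     return res
-- ===== SOURCE B (Python) =====
-- def reconstruct_from_directions(directions):
--     n = len(directions)
--     res = []
--     start = 0
--     # A stack that is only ever fully flushed just reverses each run of
--     # indices ending right before a '+' boundary; emit those runs directly.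
--     for i in range(1, n):
--         if directions[i] == '+':
--             res.extend(range(i - 1, start - 1, -1))
--             start = i
--     if n > 0:
--         res.extend(range(n - 1, start - 1, -1))
--     return res
-- ===== Notes on version B (the rewrite author's own statement) =====
-- stated objective: simpler
-- what changed: Replaces the explicit stack (append + while-pop flush) by direct emission of each reversed run via range(i-1, start-1, -1), tracking only the current run's start index.
import Mathlib
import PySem

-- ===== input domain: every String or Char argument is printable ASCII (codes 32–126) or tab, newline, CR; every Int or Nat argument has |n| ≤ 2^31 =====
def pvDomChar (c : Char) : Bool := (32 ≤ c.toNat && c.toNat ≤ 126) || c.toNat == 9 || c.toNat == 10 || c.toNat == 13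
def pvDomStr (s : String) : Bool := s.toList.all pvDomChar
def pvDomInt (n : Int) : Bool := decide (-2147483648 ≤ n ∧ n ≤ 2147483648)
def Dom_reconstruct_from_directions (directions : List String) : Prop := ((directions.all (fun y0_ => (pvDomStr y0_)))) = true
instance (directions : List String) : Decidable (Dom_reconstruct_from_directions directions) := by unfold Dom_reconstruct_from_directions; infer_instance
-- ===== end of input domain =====

-- B replaces A's explicit stack (append + while-pop flush) by emitting each reversed run
-- directly with a countdown range, tracking only the run's start index (objective: simpler).


-- ===== PORT A =====
-- loop body of A: push i on the stack, then flush it (while stack: res.append(stack.pop())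
-- appends the stack back to front, i.e. reversed) when i == n-1 or directions[i+1] == '+'
def pvStepA (directions : List String) (n : Int) (s : List Int × List Int) (i : Int) :
    List Int × List Int :=
  let stack := s.2 ++ [i]
  if i = n - 1 ∨ PySem.List.pyGet? directions (i + 1) = some "+" then
    (s.1 ++ stack.reverse, [])
  else
    (s.1, stack)

def reconstruct_from_directions (directions : List String) : List Int :=
  let n : Int := directions.length
  ((PySem.List.pyRange 0 n 1).foldl (pvStepA directions n) ([], [])).1

-- ===== PORT B =====
-- loop body of B: at a '+' boundary emit the finished run reversed and start a new run at i
def pvStepB (directions : List String) (s : List Int × Int) (i : Int) : List Int × Int :=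
  if PySem.List.pyGet? directions i = some "+" then
    (s.1 ++ PySem.List.pyRange (i - 1) (s.2 - 1) (-1), i)
  else
    s

def reconstruct_from_directions_alt (directions : List String) : List Int :=
  let n : Int := directions.length
  let s := (PySem.List.pyRange 1 n 1).foldl (pvStepB directions) ([], 0)
  if n > 0 then s.1 ++ PySem.List.pyRange (n - 1) (s.2 - 1) (-1) else s.1

-- ===== PRECONDITION & SPEC =====
def Spec_reconstruct_from_directions (directions : List String) (out : List Int) : Prop := out = reconstruct_from_directions_alt directions
instance (directions : List String) (out : List Int) : Decidable (Spec_reconstruct_from_directions directions out) := by unfold Spec_reconstruct_from_directions; infer_instance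

-- ===== CLAIM (what is proved, stated in full; the proofs are below) =====
def Claim_equal_reconstruct_from_directions : Prop := ∀ (directions : List String), Dom_reconstruct_from_directions directions → Spec_reconstruct_from_directions directions (reconstruct_from_directions directions)

-- ===== LEMMAS AND PROOFS =====

-- Invariant: after A's iterations 0..i-1 (i ≤ n-1, so A's "i == n-1" test never fired) and
-- B's iterations 1..i, the two res lists agree, A's stack is the pending run [start..i-1]
-- (B's reversed countdown range, reversed back), and B's start is at most i.
theorem pv_inv (directions : List String) (i : Nat)
    (h : (i : Int) ≤ (directions.length : Int) - 1) :
    ((PySem.List.pyRange 0 (i : Int) 1).foldl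
        (pvStepA directions (directions.length : Int)) ([], [])) =
      ((((PySem.List.pyRange 1 ((i : Int) + 1) 1).foldl (pvStepB directions) ([], 0)).1),
        (PySem.List.pyRange ((i : Int) - 1)
          (((PySem.List.pyRange 1 ((i : Int) + 1) 1).foldl (pvStepB directions) ([], 0)).2 - 1)
          (-1)).reverse)
    ∧ ((PySem.List.pyRange 1 ((i : Int) + 1) 1).foldl (pvStepB directions) ([], 0)).2 ≤ (i : Int) := by
  induction i with
  | zero =>
      simp [PySem.List.pyRange_one_eq_nil, PySem.List.pyRange_neg_one_eq_nil]
  | succ i ih =>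
      have hi : (i : Int) ≤ (directions.length : Int) - 1 := by push_cast at h ⊢; omega
      obtain ⟨heq, hle⟩ := ih hi
      have hA : PySem.List.pyRange 0 ((i : Int) + 1) 1
          = PySem.List.pyRange 0 (i : Int) 1 ++ [(i : Int)] :=
        PySem.List.pyRange_one_succ_right (by positivity)
      have hB : PySem.List.pyRange 1 ((i : Int) + 1 + 1) 1
          = PySem.List.pyRange 1 ((i : Int) + 1) 1 ++ [(i : Int) + 1] :=
        PySem.List.pyRange_one_succ_right (by omega)
      push_cast
      rw [hA, hB, List.foldl_append, List.foldl_append, heq]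
      set s := (PySem.List.pyRange 1 ((i : Int) + 1) 1).foldl (pvStepB directions) ([], 0) with hs
      have hcons : ((i : Int)) :: PySem.List.pyRange ((i : Int) - 1) (s.2 - 1) (-1)
          = PySem.List.pyRange (i : Int) (s.2 - 1) (-1) :=
        (PySem.List.pyRange_neg_one_cons (by omega)).symm
      have hne : ¬ ((i : Int) = (directions.length : Int) - 1) := by push_cast at h; omega
      simp only [List.foldl, pvStepA, pvStepB, hne, false_or]
      by_cases hget : PySem.List.pyGet? directions ((i : Int) + 1) = some "+"
      · simp [hget, List.reverse_append, hcons]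
      · simp only [if_neg hget]
        refine ⟨?_, by omega⟩
        have h11 : (i : Int) + 1 - 1 = (i : Int) := by ring
        rw [Prod.ext_iff]
        exact ⟨rfl, by simp [h11, ← hcons]⟩

theorem reconstruct_from_directions_spec : Claim_equal_reconstruct_from_directions := by
  intro directions _
  unfold Spec_reconstruct_from_directions reconstruct_from_directions reconstruct_from_directions_alt
  cases hn : directions.length with
  | zero =>
      simp [PySem.List.pyRange_one_eq_nil]
  | succ m =>
      have hm : (m : Int) ≤ (directions.length : Int) - 1 := by rw [hn]; push_cast; omega
      obtain ⟨heq, hle⟩ := pv_inv directions m hm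
      have hcast : ((directions.length : Int)) = (m : Int) + 1 := by rw [hn]; push_cast; ring
      rw [hcast] at heq
      push_cast
      rw [PySem.List.pyRange_one_succ_right (by positivity : (0 : Int) ≤ (m : Int)),
          List.foldl_append, heq]
      set s := (PySem.List.pyRange 1 ((m : Int) + 1) 1).foldl (pvStepB directions) ([], 0) with hs
      have hcons : ((m : Int)) :: PySem.List.pyRange ((m : Int) - 1) (s.2 - 1) (-1)
          = PySem.List.pyRange (m : Int) (s.2 - 1) (-1) :=
        (PySem.List.pyRange_neg_one_cons (by omega)).symm
      simp only [List.foldl, pvStepA]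
      rw [if_pos (Or.inl (by ring : (m : Int) = (m : Int) + 1 - 1))]
      rw [if_pos (by positivity : ((m : Int) + 1) > 0)]
      have h11 : (m : Int) + 1 - 1 = (m : Int) := by ring
      simp [h11, ← hcons]

-- ===== VERDICT (by name: the statement is the Claim_ definition above) =====
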